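-- pv_equiv track=rewrite | github.com/kdinesh819/newtineye | utils.py | allowed_platforms
-- ===== SOURCE A (Python) =====
-- def allowed_platforms(slugs: list, source: str):
--
--     allowed_slugs_shutterstock = ["tineye_shutterstock", "adobestock", "freepik"] #"envato" excluded not saving on server thumb issue
--     allowed_slugs_istockphoto = ["tineye_istockphoto", "adobestock", "freepik"]
--     allowed_slugs_alamy = ["tineye_alamy", "adobestock", "freepik"]
--     allowed_slug_depositphotos = ["tineye_depositphotos", "adobestock", "freepik"]
--
--     if source == "shutterstock":
--         filtered_data = [item for item in slugs if item["slug"] in allowed_slugs_shutterstock]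
--         return filtered_data
--     elif source == "istockphoto":
--         filtered_data = [item for item in slugs if item["slug"] in allowed_slugs_istockphoto]
--         return filtered_data
--     elif source == "alamy":
--         filtered_data = [item for item in slugs if item["slug"] in allowed_slugs_alamy]
--         return filtered_data
--     elif source == "depositphotos":
--         filtered_data = [item for item in slugs if item["slug"] in allowed_slug_depositphotos]
--         return filtered_data
--     else:
--         return slugs
-- ===== SOURCE B (Python) =====
-- def allowed_platforms(slugs: list, source: str):
--     if source not in ("shutterstock", "istockphoto", "alamy", "depositphotos"):
--         return slugs
--     filtered = []
--     for item in slugs: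
--         slug = item["slug"]
--         if slug == "adobestock" or slug == "freepik" or (slug.startswith("tineye_") and slug[7:] == source):
--             filtered.append(item)
--     return filtered
-- ===== Notes on version B (the rewrite author's own statement) =====
-- stated objective: alternative
-- what changed: No allow-lists at all: B keeps an item by parsing its slug (the two shared platforms, or the 'tineye_' prefix whose remainder must equal source), collected in one explicit accumulator loop instead of A's 5-way branch over four hard-coded lists with a membership test.
import Mathlib
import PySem

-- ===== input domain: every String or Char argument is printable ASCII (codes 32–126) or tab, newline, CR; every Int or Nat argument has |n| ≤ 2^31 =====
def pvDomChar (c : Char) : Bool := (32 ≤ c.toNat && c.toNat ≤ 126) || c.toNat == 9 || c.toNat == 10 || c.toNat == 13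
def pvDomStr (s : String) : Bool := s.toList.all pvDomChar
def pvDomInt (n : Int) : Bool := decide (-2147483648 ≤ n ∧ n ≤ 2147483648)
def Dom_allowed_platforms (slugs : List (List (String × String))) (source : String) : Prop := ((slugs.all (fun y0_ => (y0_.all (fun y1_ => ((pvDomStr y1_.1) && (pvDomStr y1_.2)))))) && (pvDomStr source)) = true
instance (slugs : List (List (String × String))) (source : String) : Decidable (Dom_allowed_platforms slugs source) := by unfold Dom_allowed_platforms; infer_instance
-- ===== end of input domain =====

-- B drops A's four hard-coded allow-lists: it keeps an item by parsing its slug (shared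
-- platform name, or 'tineye_' prefix whose remainder equals source) in one accumulator loop.

-- item["slug"] : first match in the association list; the .getD "" default is never reached
-- inside Pre_ (a missing "slug" key is a KeyError in Python and is excluded by Pre_).
def pvSlugOf (item : List (String × String)) : String := (List.lookup "slug" item).getD ""

-- ===== PORT A =====
def allowed_platforms (slugs : List (List (String × String))) (source : String) : List (List (String × String)) :=
  let allowed_slugs_shutterstock : List String := ["tineye_shutterstock", "adobestock", "freepik"]
  let allowed_slugs_istockphoto : List String := ["tineye_istockphoto", "adobestock", "freepik"]
  let allowed_slugs_alamy : List String := ["tineye_alamy", "adobestock", "freepik"]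
  let allowed_slug_depositphotos : List String := ["tineye_depositphotos", "adobestock", "freepik"]
  if source = "shutterstock" then
    slugs.filter (fun item => allowed_slugs_shutterstock.contains (pvSlugOf item))
  else if source = "istockphoto" then
    slugs.filter (fun item => allowed_slugs_istockphoto.contains (pvSlugOf item))
  else if source = "alamy" then
    slugs.filter (fun item => allowed_slugs_alamy.contains (pvSlugOf item))
  else if source = "depositphotos" then
    slugs.filter (fun item => allowed_slug_depositphotos.contains (pvSlugOf item))
  else
    slugs

-- ===== PORT B =====
-- B's keep-test: slug is one of the two shared platforms, or starts with "tineye_" and the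
-- rest (slug[7:]) equals source.
def pvKeep (source slug : String) : Bool :=
  slug == "adobestock" || slug == "freepik" ||
    (PySem.Str.startswith slug "tineye_" && PySem.Str.slice slug (some 7) none == source)

def allowed_platforms_alt (slugs : List (List (String × String))) (source : String) : List (List (String × String)) :=
  if !((["shutterstock", "istockphoto", "alamy", "depositphotos"] : List String).contains source) then
    slugs
  else
    slugs.foldl (fun filtered item =>
      if pvKeep source (pvSlugOf item) then filtered ++ [item] else filtered) []

-- ===== PRECONDITION & SPEC =====
-- Pre_ excludes exactly the inputs where Python A raises KeyError: source is one of the four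
-- handled sources and some item lacks a "slug" key.
def Pre_allowed_platforms (slugs : List (List (String × String))) (source : String) : Prop :=
  (source = "shutterstock" ∨ source = "istockphoto" ∨ source = "alamy" ∨ source = "depositphotos") →
    slugs.all (fun item => (List.lookup "slug" item).isSome) = true
instance (slugs : List (List (String × String))) (source : String) : Decidable (Pre_allowed_platforms slugs source) := by unfold Pre_allowed_platforms; infer_instance

def pvWitness_allowed_platforms : (List (List (String × String))) × String :=
  ([[("slug", "adobestock")], [("slug", "envato")]], "alamy")

def Spec_allowed_platforms (slugs : List (List (String × String))) (source : String) (out : List (List (String × String))) : Prop := out = allowed_platforms_alt slugs source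
instance (slugs : List (List (String × String))) (source : String) (out : List (List (String × String))) : Decidable (Spec_allowed_platforms slugs source out) := by unfold Spec_allowed_platforms; infer_instance

-- ===== CLAIM =====
def Claim_equal_allowed_platforms : Prop := ∀ (slugs : List (List (String × String))) (source : String), Dom_allowed_platforms slugs source → Pre_allowed_platforms slugs source → Spec_allowed_platforms slugs source (allowed_platforms slugs source)

-- ===== LEMMAS AND PROOFS =====

-- B's prefix/suffix parse of the slug agrees with "slug = 'tineye_' ++ src".
lemma tineye_iff (src slug : String) :
    (PySem.Str.startswith slug "tineye_" && (PySem.Str.slice slug (some 7) none == src)) = true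
      ↔ slug = "tineye_" ++ src := by
  rw [Bool.and_eq_true, beq_iff_eq, PySem.Str.startswith_eq, PySem.Chars.startswith_iff]
  constructor
  · rintro ⟨hpre, hsl⟩
    have hdrop : slug.toList.drop 7 = src.toList := by
      have := congrArg String.toList hsl
      rwa [PySem.Str.toList_slice, PySem.Chars.slice_eq_listSlice,
        PySem.List.slice_from slug.toList (by norm_num : (0:Int) ≤ 7)] at this
    have htake : slug.toList.take 7 = "tineye_".toList := by
      have h := List.prefix_iff_eq_take.mp hpre
      simpa using h.symm
    have : slug.toList = ("tineye_" ++ src).toList := by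
      rw [String.toList_append, ← htake, ← hdrop, List.take_append_drop]
    exact String.toList_injective this
  · rintro rfl
    constructor
    · exact ⟨src.toList, by rw [String.toList_append]⟩
    · apply String.toList_injective
      rw [PySem.Str.toList_slice, PySem.Chars.slice_eq_listSlice,
        PySem.List.slice_from ("tineye_" ++ src).toList (by norm_num : (0:Int) ≤ 7), String.toList_append]
      simp

-- A's membership test in ["tineye_"++src, "adobestock", "freepik"] equals B's keep-test.
lemma contains_eq_keep (src slug : String) :
    (["tineye_" ++ src, "adobestock", "freepik"] : List String).contains slug = pvKeep src slug := by
  unfold pvKeep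
  by_cases hte : slug = "tineye_" ++ src
  · rw [(tineye_iff src slug).mpr hte]
    simp [hte]
  · have h : (PySem.Str.startswith slug "tineye_" && (PySem.Str.slice slug (some 7) none == src)) = false := by
      cases hb : (PySem.Str.startswith slug "tineye_" && (PySem.Str.slice slug (some 7) none == src))
      · rfl
      · exact absurd ((tineye_iff src slug).mp hb) hte
    rw [h]
    simp only [List.contains_eq_mem, List.mem_cons, List.not_mem_nil, or_false, Bool.or_false]
    by_cases h1 : slug = "adobestock" <;> by_cases h2 : slug = "freepik" <;>
      simp [h1, h2, hte, Ne.symm]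

lemma filter_eq_of_src (slugs : List (List (String × String))) (src : String) :
    slugs.filter (fun item => (["tineye_" ++ src, "adobestock", "freepik"] : List String).contains (pvSlugOf item))
      = slugs.foldl (fun filtered item =>
          if pvKeep src (pvSlugOf item) then filtered ++ [item] else filtered) [] := by
  rw [PySem.List.foldl_append_if_eq_filter (fun item => pvKeep src (pvSlugOf item)) slugs []]
  simp only [List.nil_append]
  exact List.filter_congr (fun item _ => contains_eq_keep src (pvSlugOf item))

-- ===== VERDICT =====
theorem allowed_platforms_spec : Claim_equal_allowed_platforms := by
  intro slugs source _ _
  unfold Spec_allowed_platforms allowed_platforms allowed_platforms_alt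
  by_cases h1 : source = "shutterstock"
  · subst h1; exact filter_eq_of_src slugs "shutterstock"
  by_cases h2 : source = "istockphoto"
  · subst h2; simp only [if_neg h1]; exact filter_eq_of_src slugs "istockphoto"
  by_cases h3 : source = "alamy"
  · subst h3; simp only [if_neg h1, if_neg h2]; exact filter_eq_of_src slugs "alamy"
  by_cases h4 : source = "depositphotos"
  · subst h4; simp only [if_neg h1, if_neg h2, if_neg h3]
    exact filter_eq_of_src slugs "depositphotos"
  · have hc : (["shutterstock", "istockphoto", "alamy", "depositphotos"] : List String).contains source = false := by
      simp only [List.contains_eq_mem, List.mem_cons, List.not_mem_nil, or_false, decide_eq_false_iff_not]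
      tauto
    rw [if_neg h1, if_neg h2, if_neg h3, if_neg h4, hc]
    simp
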